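-- pv_equiv track=rewrite | github.com/Big-boss2025/Marketing-Ai-System | services/free_content_generator.py | _parse_ad_variations
-- ===== SOURCE A (Python) =====
-- from typing import Dict, Any, List, Optional
--
-- def _parse_ad_variations(content: str, max_length: int) -> List[str]:
--     """Parse ad content into variations"""
--     variations = []
--     lines = content.split('\n')
--
--     current_variation = []
--     for line in lines:
--         line = line.strip()
--         if not line:
--             if current_variation:
--                 variation_text = ' '.join(current_variation)
--                 if len(variation_text) <= max_length:
--                     variations.append(variation_text)
--                 current_variation = []
--         else:
--             current_variation.append(line)
--
--     # Add last variation
--     if current_variation: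
--         variation_text = ' '.join(current_variation)
--         if len(variation_text) <= max_length:
--             variations.append(variation_text)
--
--     return variations[:3]  # Return top 3 variations
-- ===== SOURCE B (Python) =====
-- def _parse_ad_variations(content, max_length):
--     """Parse ad content into variations, building the block texts back-to-front.
--
--     A single reverse pass turns the lines into the list of block texts (each
--     block = maximal run of non-blank stripped lines, joined by spaces); a final
--     comprehension filters by length and keeps the first three.
--     """
--     texts = []
--     nxt = ''  # stripped value of the line that follows the current one
--     for line in reversed(content.split('\n')):
--         s = line.strip()
--         if s:
--             if nxt:
--                 texts[0] = s + ' ' + texts[0]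
--             else:
--                 texts.insert(0, s)
--         nxt = s
--     return [t for t in texts if len(t) <= max_length][:3]
-- ===== Notes on version B (the rewrite author's own statement) =====
-- stated objective: alternative
-- what changed: Replaces the forward accumulator-buffer loop with its separate trailing flush by a single backward pass that builds each block's joined text directly (prepending to the first text, using the stripped next line as the block-boundary signal), followed by one filter-and-take-3 comprehension.
import Mathlib
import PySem

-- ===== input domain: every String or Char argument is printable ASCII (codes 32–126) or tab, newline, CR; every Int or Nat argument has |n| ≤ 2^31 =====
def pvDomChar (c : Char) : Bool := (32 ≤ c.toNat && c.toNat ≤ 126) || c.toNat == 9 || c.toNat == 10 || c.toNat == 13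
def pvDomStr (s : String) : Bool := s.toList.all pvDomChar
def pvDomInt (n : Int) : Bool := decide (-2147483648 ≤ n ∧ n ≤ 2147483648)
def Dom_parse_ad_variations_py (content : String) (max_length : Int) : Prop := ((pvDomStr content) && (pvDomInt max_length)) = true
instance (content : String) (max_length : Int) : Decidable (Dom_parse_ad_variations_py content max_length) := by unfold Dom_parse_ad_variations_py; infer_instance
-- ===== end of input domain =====

-- B builds the block texts back-to-front in one reverse pass and filters at the end,
-- instead of A's forward buffer-and-flush loop with a duplicated trailing flush (objective: alternative).


-- ===== PORT A =====
def parse_ad_variations_py (content : String) (max_length : Int) : List String :=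
  let lines := (PySem.Str.split? content "\n").getD []
  let st := lines.foldl (fun (st : List String × List String) line =>
    let line := PySem.Str.strip line
    if line = "" then
      if st.2 ≠ [] then
        let variation_text := PySem.Str.join " " st.2
        (if PySem.Str.len variation_text ≤ max_length then st.1 ++ [variation_text] else st.1, [])
      else st
    else (st.1, st.2 ++ [line])) ([], [])
  -- Add last variation
  let variations :=
    if st.2 ≠ [] then
      let variation_text := PySem.Str.join " " st.2
      if PySem.Str.len variation_text ≤ max_length then st.1 ++ [variation_text] else st.1
    else st.1
  PySem.List.slice variations none (some 3)

-- ===== PORT B =====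
-- 'for line in reversed(lines)' with state (texts, nxt) is List.foldr over lines.
def parse_ad_variations_py_alt (content : String) (max_length : Int) : List String :=
  let lines := (PySem.Str.split? content "\n").getD []
  let st := lines.foldr (fun line (st : List String × String) =>
    let s := PySem.Str.strip line
    (if s ≠ "" then
       if st.2 ≠ "" then
         match st.1 with
         | t :: ts => (s ++ " " ++ t) :: ts
         | [] => [s]        -- unreachable: nxt ≠ '' means texts is nonempty
     else s :: st.1
     else st.1, s)) ([], "")
  PySem.List.slice (st.1.filter (fun t => PySem.Str.len t ≤ max_length)) none (some 3)

-- ===== PRECONDITION & SPEC =====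
def Spec_parse_ad_variations_py (content : String) (max_length : Int) (out : List String) : Prop := out = parse_ad_variations_py_alt content max_length
instance (content : String) (max_length : Int) (out : List String) : Decidable (Spec_parse_ad_variations_py content max_length out) := by unfold Spec_parse_ad_variations_py; infer_instance

-- ===== CLAIM (what is proved, stated in full; the proofs are below) =====
def Claim_equal_parse_ad_variations_py : Prop := ∀ (content : String) (max_length : Int), Dom_parse_ad_variations_py content max_length → Spec_parse_ad_variations_py content max_length (parse_ad_variations_py content max_length)

-- ===== LEMMAS AND PROOFS =====

-- Named copies of the two loop bodies (definitionally equal to the inline lambdas in the ports).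
def pvStepA (max_length : Int) (st : List String × List String) (line : String) : List String × List String :=
  let line := PySem.Str.strip line
  if line = "" then
    if st.2 ≠ [] then
      let variation_text := PySem.Str.join " " st.2
      (if PySem.Str.len variation_text ≤ max_length then st.1 ++ [variation_text] else st.1, [])
    else st
  else (st.1, st.2 ++ [line])

def pvStepB (line : String) (st : List String × String) : List String × String :=
  let s := PySem.Str.strip line
  (if s ≠ "" then
     if st.2 ≠ "" then
       match st.1 with
       | t :: ts => (s ++ " " ++ t) :: ts
       | [] => [s]
   else s :: st.1
   else st.1, s)

-- A's trailing flush, and how B's fold state merges with A's pending buffer.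
def pvFlush (max_length : Int) (st : List String × List String) : List String :=
  if st.2 ≠ [] then
    let variation_text := PySem.Str.join " " st.2
    if PySem.Str.len variation_text ≤ max_length then st.1 ++ [variation_text] else st.1
  else st.1

def pvMerge (cur : List String) (st : List String × String) : List String :=
  if cur = [] then st.1
  else if st.2 ≠ "" then
    match st.1 with
    | t :: ts => (PySem.Str.join " " cur ++ " " ++ t) :: ts
    | [] => [PySem.Str.join " " cur]
  else PySem.Str.join " " cur :: st.1

theorem pv_join_singleton (s : String) : PySem.Str.join " " [s] = s := by
  have : (PySem.Str.join " " [s]).toList = s.toList := by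
    simp [PySem.Str.toList_join, PySem.Chars.join_singleton]
  exact String.toList_inj.mp this

theorem pv_chars_join_append (cur : List (List Char)) (s : List Char) (h : cur ≠ []) :
    PySem.Chars.join [' '] (cur ++ [s]) = PySem.Chars.join [' '] cur ++ ' ' :: s := by
  induction cur with
  | nil => simp at h
  | cons a t ih =>
    cases t with
    | nil => simp [PySem.Chars.join_cons_cons, PySem.Chars.join_singleton]
    | cons b t' =>
      have := ih (by simp)
      simp only [List.cons_append, PySem.Chars.join_cons_cons] at this ⊢
      simp [this, List.append_assoc]

theorem pv_join_append (cur : List String) (s : String) (h : cur ≠ []) :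
    PySem.Str.join " " (cur ++ [s]) = PySem.Str.join " " cur ++ " " ++ s := by
  apply String.toList_inj.mp
  have hmap : (cur ++ [s]).map String.toList = cur.map String.toList ++ [s.toList] := by simp
  simp only [PySem.Str.toList_join, String.toList_append, hmap]
  have := pv_chars_join_append (cur.map String.toList) s.toList (by simpa using h)
  simpa using this

-- B's fold: the stored 'nxt' is the stripped first line, and the text list is
-- nonempty (a cons) as soon as the first line strips nonblank.
theorem pv_foldB_snd (a : String) (as : List String) :
    ((a :: as).foldr pvStepB ([], "")).2 = PySem.Str.strip a := by
  simp [pvStepB]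

theorem pv_foldB_ne (a : String) (as : List String) (h : PySem.Str.strip a ≠ "") :
    ∃ t ts, ((a :: as).foldr pvStepB ([], "")).1 = t :: ts := by
  simp only [List.foldr_cons]
  by_cases h2 : (as.foldr pvStepB ([], "")).2 = ""
  · exact ⟨PySem.Str.strip a, (as.foldr pvStepB ([], "")).1, by simp [pvStepB, h, h2]⟩
  · cases hc : (as.foldr pvStepB ([], "")).1 with
    | nil => exact ⟨PySem.Str.strip a, [], by simp [pvStepB, h, h2, hc]⟩
    | cons t ts => exact ⟨PySem.Str.strip a ++ " " ++ t, ts, by simp [pvStepB, h, h2, hc]⟩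

theorem pv_len_join (cur : List String) :
    (PySem.Chars.join [' '] (List.map String.toList cur)).length
      = (PySem.Str.join " " cur).length := by
  have h : (PySem.Str.join " " cur).toList
      = PySem.Chars.join [' '] (List.map String.toList cur) := by simp
  calc (PySem.Chars.join [' '] (List.map String.toList cur)).length
      = (PySem.Str.join " " cur).toList.length := by rw [h]
    _ = (PySem.Str.join " " cur).length := String.length_toList

theorem pvFlush_eq (m : Int) (vars cur : List String) :
    pvFlush m (vars, cur) =
      vars ++ (if cur = [] then [] else
        List.filter (fun t => decide (PySem.Str.len t ≤ m)) [PySem.Str.join " " cur]) := by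
  by_cases hc : cur = []
  · simp [pvFlush, hc]
  · by_cases hl : ((PySem.Str.join " " cur).length : Int) ≤ m <;>
      simp [pvFlush, hc, hl, List.filter, pv_len_join]

theorem pvMerge_blank (cur : List String) (st : List String × String) (h : st.2 = "") :
    pvMerge cur st = if cur = [] then st.1 else PySem.Str.join " " cur :: st.1 := by
  simp [pvMerge, h]

-- Main invariant: A's loop-with-flush on the remaining lines, started from (vars, cur),
-- equals vars followed by the length-filtered block texts that B's fold computes,
-- with the pending buffer cur merged into the first block when adjacent.
theorem pv_main (m : Int) (lines : List String) :
    ∀ (vars cur : List String),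
      pvFlush m (lines.foldl (pvStepA m) (vars, cur)) =
      vars ++ (pvMerge cur (lines.foldr pvStepB ([], ""))).filter
        (fun t => PySem.Str.len t ≤ m) := by
  induction lines with
  | nil =>
    intro vars cur
    rw [List.foldl_nil, List.foldr_nil, pvFlush_eq, pvMerge_blank _ _ rfl]
    by_cases hc : cur = [] <;> simp [hc, List.filter, pv_len_join]
  | cons l ls ih =>
    intro vars cur
    by_cases hs : PySem.Str.strip l = ""
    · -- blank line: A flushes cur; B starts a fresh (blank) boundary.
      have hstep : pvStepA m (vars, cur) l = (pvFlush m (vars, cur), []) := by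
        by_cases hc : cur = [] <;> simp [pvStepA, pvFlush, hs, hc]
      have hB : (l :: ls).foldr pvStepB ([], "") = ((ls.foldr pvStepB ([], "")).1, "") := by
        simp [pvStepB, hs]
      rw [List.foldl_cons, hstep, ih, hB,
        pvMerge_blank cur ((ls.foldr pvStepB ([], "")).1, "") rfl, pvFlush_eq]
      simp only [pvMerge, if_pos rfl]
      by_cases hc : cur = []
      · simp [hc]
      · simp [hc, ← List.filter_append, List.append_assoc, pv_len_join]
    · -- nonblank line: A appends the strip to cur; B prepends it to the head block.
      have hstep : pvStepA m (vars, cur) l = (vars, cur ++ [PySem.Str.strip l]) := by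
        simp [pvStepA, hs]
      rw [List.foldl_cons, hstep, ih]
      have key : pvMerge (cur ++ [PySem.Str.strip l]) (ls.foldr pvStepB ([], "")) =
          pvMerge cur ((l :: ls).foldr pvStepB ([], "")) := by
        cases ls with
        | nil =>
          have hstepB : (l :: ([] : List String)).foldr pvStepB ([], "")
              = ([PySem.Str.strip l], PySem.Str.strip l) := by simp [pvStepB, hs]
          rw [hstepB, pvMerge_blank _ _ rfl]
          by_cases hc : cur = []
          · simp [hc, pvMerge, pv_join_singleton]
          · simp [hc, pvMerge, hs, pv_join_append cur _ hc]
        | cons a as =>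
          by_cases ha : PySem.Str.strip a = ""
          · -- next line blank: strip l starts the head block alone
            have h2 : ((a :: as).foldr pvStepB ([], "")).2 = "" := by
              rw [pv_foldB_snd]; exact ha
            have hstepB : (l :: a :: as).foldr pvStepB ([], "")
                = (PySem.Str.strip l :: ((a :: as).foldr pvStepB ([], "")).1,
                   PySem.Str.strip l) := by
              rw [show (l :: a :: as).foldr pvStepB ([], "")
                    = pvStepB l ((a :: as).foldr pvStepB ([], "")) from rfl]
              generalize hg : (a :: as).foldr pvStepB ([], "") = st at h2 ⊢
              obtain ⟨X, y⟩ := st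
              simp only at h2
              subst h2
              simp [pvStepB, hs]
            rw [hstepB, pvMerge_blank _ _ h2]
            by_cases hc : cur = []
            · simp [hc, pvMerge, hs, pv_join_singleton]
            · simp [hc, pvMerge, hs, pv_join_append cur _ hc]
          · -- next line nonblank: strip l is glued onto the head block text
            have h2 : ((a :: as).foldr pvStepB ([], "")).2 ≠ "" := by
              rw [pv_foldB_snd]; exact ha
            obtain ⟨t, ts, hts⟩ := pv_foldB_ne a as ha
            have hstepB : (l :: a :: as).foldr pvStepB ([], "")
                = ((PySem.Str.strip l ++ " " ++ t) :: ts, PySem.Str.strip l) := by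
              rw [show (l :: a :: as).foldr pvStepB ([], "")
                    = pvStepB l ((a :: as).foldr pvStepB ([], "")) from rfl]
              generalize hg : (a :: as).foldr pvStepB ([], "") = st at h2 hts ⊢
              obtain ⟨X, y⟩ := st
              simp only at h2 hts
              subst hts
              simp [pvStepB, hs, h2]
            rw [hstepB]
            generalize hg : (a :: as).foldr pvStepB ([], "") = F at h2 hts ⊢
            by_cases hc : cur = []
            · simp [hc, pvMerge, hs, h2, hts, pv_join_singleton]
            · simp [hc, pvMerge, hs, h2, hts, pv_join_append cur _ hc,
                String.append_assoc]
      rw [key]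

theorem parse_ad_variations_py_eq (content : String) (max_length : Int) :
    parse_ad_variations_py content max_length = parse_ad_variations_py_alt content max_length := by
  show PySem.List.slice
      (pvFlush max_length
        (((PySem.Str.split? content "\n").getD []).foldl (pvStepA max_length) ([], [])))
      none (some 3) =
    PySem.List.slice
      ((((PySem.Str.split? content "\n").getD []).foldr pvStepB ([], "")).1.filter
        (fun t => PySem.Str.len t ≤ max_length))
      none (some 3)
  have h := pv_main max_length ((PySem.Str.split? content "\n").getD []) [] []
  rw [h]
  simp [pvMerge]

-- ===== VERDICT (by name: the statement is the Claim_ definition above) =====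
theorem parse_ad_variations_py_spec : Claim_equal_parse_ad_variations_py := by
  intro content max_length _
  unfold Spec_parse_ad_variations_py
  exact parse_ad_variations_py_eq content max_length
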